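-- pv_equiv track=rewrite | github.com/zhengli0817/ProgrammingInterviewQuestions | IsHexspeak.py | IsHexspeak
-- ===== SOURCE A (Python) =====
-- def IsHexspeak(n):
--     hexn = hex(int(n))
--     hexn = hexn[2:]
--     for c in ['2', '3', '4', '5', '6', '7', '8', '9']:
--         if c in hexn: return 'ERROR'
--     hexn = hexn.replace('1', 'I')
--     hexn = hexn.replace('0', 'O')
--
--     return hexn.upper()
-- ===== SOURCE B (Python) =====
-- def IsHexspeak(n):
--     # Single pass over hex(int(n))[2:]: validate and transform each char at once.
--     s = hex(int(n))[2:]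
--     out = []
--     for c in s:
--         if c in '23456789':
--             return 'ERROR'
--         out.append('I' if c == '1' else 'O' if c == '0' else c.upper())
--     return ''.join(out)
-- ===== Notes on version B (the rewrite author's own statement) =====
-- stated objective: idiomatic
-- what changed: B validates and transforms each character of hex(int(n))[2:] in a single pass with an early return (append I/O/upper per char, join at the end) instead of A's eight separate substring scans followed by two whole-string .replace passes and .upper().
import Mathlib
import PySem

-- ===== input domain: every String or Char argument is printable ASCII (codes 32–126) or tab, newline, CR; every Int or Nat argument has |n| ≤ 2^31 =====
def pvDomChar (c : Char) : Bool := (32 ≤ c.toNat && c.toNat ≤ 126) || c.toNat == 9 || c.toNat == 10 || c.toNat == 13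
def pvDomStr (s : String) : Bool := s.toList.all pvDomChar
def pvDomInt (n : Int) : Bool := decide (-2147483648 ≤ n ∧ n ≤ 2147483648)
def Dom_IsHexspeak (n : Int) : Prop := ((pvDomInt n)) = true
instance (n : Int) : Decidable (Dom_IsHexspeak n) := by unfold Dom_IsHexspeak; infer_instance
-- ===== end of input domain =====

-- B validates and transforms hex(n)[2:] in ONE pass per char instead of A's eight
-- substring scans plus two .replace passes plus .upper(); objective: idiomatic/alternative.

-- hex(n) as a char list: sign, then "0x", then lowercase hex digits of |n|
-- (Nat.toDigits 16 is exactly CPython's lowercase digit string; exact for every Int).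
def pyHex (n : Int) : List Char :=
  (if n < 0 then ['-', '0', 'x'] else ['0', 'x']) ++ Nat.toDigits 16 n.natAbs

-- ===== PORT A =====
-- the `for c in [...]: if c in hexn: return 'ERROR'` loop, then the replace/replace/upper tail
def hexCheckLoop : List Char → List Char → String
  | [], hexn =>
      String.ofList (PySem.Chars.upper
        (PySem.Chars.replace (PySem.Chars.replace hexn ['1'] ['I']) ['0'] ['O']))
  | c :: rest, hexn =>
      if PySem.Chars.isIn [c] hexn then "ERROR" else hexCheckLoop rest hexn

def IsHexspeak (n : Int) : String :=
  hexCheckLoop ['2', '3', '4', '5', '6', '7', '8', '9']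
    (PySem.List.slice (pyHex n) (some 2) none)

-- ===== PORT B =====
-- one pass: reject on a digit 2-9, else push the transformed char; join at the end
def altGo : List Char → List Char → String
  | [], acc => String.ofList acc.reverse
  | c :: rest, acc =>
      if c ∈ ['2', '3', '4', '5', '6', '7', '8', '9'] then "ERROR"
      else altGo rest
        ((if c = '1' then 'I' else if c = '0' then 'O' else PySem.Chars.upperChar c) :: acc)

def IsHexspeak_alt (n : Int) : String :=
  altGo (PySem.List.slice (pyHex n) (some 2) none) []

-- ===== PRECONDITION & SPEC =====
def Spec_IsHexspeak (n : Int) (out : String) : Prop := out = IsHexspeak_alt n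
instance (n : Int) (out : String) : Decidable (Spec_IsHexspeak n out) := by unfold Spec_IsHexspeak; infer_instance

-- ===== CLAIM (what is proved, stated in full; the proofs are below) =====
def Claim_equal_IsHexspeak : Prop := ∀ (n : Int), Dom_IsHexspeak n → Spec_IsHexspeak n (IsHexspeak n)

-- ===== LEMMAS AND PROOFS =====

-- replacing a single char by a single char is a pointwise map
def trChar (a b c : Char) : Char := if c = a then b else c

theorem go_single (a b : Char) (l : List Char) : ∀ (fuel : Nat) (acc : List Char), l.length ≤ fuel →
    PySem.Chars.replace.go [a] [b] fuel l acc = acc.reverse ++ l.map (trChar a b) := by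
  induction l with
  | nil =>
    intro fuel acc _
    cases fuel <;> simp [PySem.Chars.replace.go]
  | cons c t ih =>
    intro fuel acc h
    cases fuel with
    | zero => simp at h
    | succ m =>
      by_cases hc : c = a
      · have hpre : [a].isPrefixOf (c :: t) = true := by simp [List.isPrefixOf, hc]
        rw [PySem.Chars.replace.go, if_pos hpre]
        simp only [List.length_singleton, List.drop_succ_cons, List.drop_zero]
        simp only [List.length_cons] at h
        rw [ih m _ (by omega)]
        simp [trChar, hc]
      · have hpre : [a].isPrefixOf (c :: t) = false := by
          simp [List.isPrefixOf]
          exact fun hh => (hc hh.symm).elim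
        rw [PySem.Chars.replace.go, if_neg (by simp [hpre])]
        simp only [List.length_cons] at h
        rw [ih m _ (by omega)]
        simp [trChar, hc]

theorem replace_single (cs : List Char) (a b : Char) :
    PySem.Chars.replace cs [a] [b] = cs.map (trChar a b) := by
  rw [PySem.Chars.replace]
  simp only [List.isEmpty_cons, if_neg Bool.false_ne_true]
  exact go_single a b cs cs.length [] (le_refl _)

-- B's per-char transform
def bChar (c : Char) : Char :=
  if c = '1' then 'I' else if c = '0' then 'O' else PySem.Chars.upperChar c

theorem a_tail_char (c : Char) :
    PySem.Chars.upperChar (trChar '0' 'O' (trChar '1' 'I' c)) = bChar c := by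
  by_cases h1 : c = '1'
  · simp [trChar, bChar, h1]; decide
  · by_cases h0 : c = '0'
    · simp [trChar, bChar, h0]; decide
    · simp [trChar, bChar, h1, h0]

theorem altGo_spec (cs : List Char) : ∀ acc,
    altGo cs acc =
      if cs.any (fun c => c ∈ ['2', '3', '4', '5', '6', '7', '8', '9']) then "ERROR"
      else String.ofList (acc.reverse ++ cs.map bChar) := by
  induction cs with
  | nil => intro acc; simp [altGo]
  | cons c t ih =>
    intro acc
    by_cases hc : c ∈ ['2', '3', '4', '5', '6', '7', '8', '9']
    · fin_cases hc <;> simp [altGo]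
    · have hcd : (decide (c ∈ ['2', '3', '4', '5', '6', '7', '8', '9'])) = false :=
        decide_eq_false hc
      rw [altGo, if_neg hc, ih]
      simp only [List.any_cons, hcd, Bool.false_or, List.reverse_cons, List.append_assoc,
        List.singleton_append, List.map_cons, bChar]

-- A's sequential membership tests agree with B's first-bad-char early return.
theorem main_eq (cs : List Char) :
    hexCheckLoop ['2', '3', '4', '5', '6', '7', '8', '9'] cs = altGo cs [] := by
  by_cases h2 : '2' ∈ cs
  · have hy : (cs.any fun c => decide (c ∈ ['2', '3', '4', '5', '6', '7', '8', '9'])) = true :=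
      List.any_eq_true.mpr ⟨'2', h2, by decide⟩
    rw [altGo_spec cs [], hy]
    simp [hexCheckLoop, PySem.Chars.isIn_iff_infix, List.singleton_infix_iff, h2]
  · by_cases h3 : '3' ∈ cs
    · have hy : (cs.any fun c => decide (c ∈ ['2', '3', '4', '5', '6', '7', '8', '9'])) = true :=
        List.any_eq_true.mpr ⟨'3', h3, by decide⟩
      rw [altGo_spec cs [], hy]
      simp [hexCheckLoop, PySem.Chars.isIn_iff_infix, List.singleton_infix_iff, h2, h3]
    · by_cases h4 : '4' ∈ cs
      · have hy : (cs.any fun c => decide (c ∈ ['2', '3', '4', '5', '6', '7', '8', '9'])) = true :=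
          List.any_eq_true.mpr ⟨'4', h4, by decide⟩
        rw [altGo_spec cs [], hy]
        simp [hexCheckLoop, PySem.Chars.isIn_iff_infix, List.singleton_infix_iff, h2, h3, h4]
      · by_cases h5 : '5' ∈ cs
        · have hy : (cs.any fun c => decide (c ∈ ['2', '3', '4', '5', '6', '7', '8', '9'])) = true :=
            List.any_eq_true.mpr ⟨'5', h5, by decide⟩
          rw [altGo_spec cs [], hy]
          simp [hexCheckLoop, PySem.Chars.isIn_iff_infix, List.singleton_infix_iff, h2, h3, h4, h5]
        · by_cases h6 : '6' ∈ cs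
          · have hy : (cs.any fun c => decide (c ∈ ['2', '3', '4', '5', '6', '7', '8', '9'])) = true :=
              List.any_eq_true.mpr ⟨'6', h6, by decide⟩
            rw [altGo_spec cs [], hy]
            simp [hexCheckLoop, PySem.Chars.isIn_iff_infix, List.singleton_infix_iff, h2, h3, h4, h5, h6]
          · by_cases h7 : '7' ∈ cs
            · have hy : (cs.any fun c => decide (c ∈ ['2', '3', '4', '5', '6', '7', '8', '9'])) = true :=
                List.any_eq_true.mpr ⟨'7', h7, by decide⟩
              rw [altGo_spec cs [], hy]
              simp [hexCheckLoop, PySem.Chars.isIn_iff_infix, List.singleton_infix_iff, h2, h3, h4, h5, h6, h7]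
            · by_cases h8 : '8' ∈ cs
              · have hy : (cs.any fun c => decide (c ∈ ['2', '3', '4', '5', '6', '7', '8', '9'])) = true :=
                  List.any_eq_true.mpr ⟨'8', h8, by decide⟩
                rw [altGo_spec cs [], hy]
                simp [hexCheckLoop, PySem.Chars.isIn_iff_infix, List.singleton_infix_iff, h2, h3, h4, h5, h6, h7, h8]
              · by_cases h9 : '9' ∈ cs
                · have hy : (cs.any fun c => decide (c ∈ ['2', '3', '4', '5', '6', '7', '8', '9'])) = true :=
                    List.any_eq_true.mpr ⟨'9', h9, by decide⟩
                  rw [altGo_spec cs [], hy]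
                  simp [hexCheckLoop, PySem.Chars.isIn_iff_infix, List.singleton_infix_iff, h2, h3, h4, h5, h6, h7, h8, h9]
                · have hy : (cs.any fun c => decide (c ∈ ['2', '3', '4', '5', '6', '7', '8', '9'])) = false := by
                    simp only [List.any_eq_false, decide_eq_true_eq]
                    intro x hx hmem
                    simp only [List.mem_cons, List.not_mem_nil, or_false] at hmem
                    rcases hmem with rfl | rfl | rfl | rfl | rfl | rfl | rfl | rfl <;> tauto
                  have hfe : PySem.Chars.upperChar ∘ (trChar '0' 'O' ∘ trChar '1' 'I') = bChar :=
                    funext (fun c => a_tail_char c)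
                  rw [altGo_spec cs [], hy]
                  simp [hexCheckLoop, PySem.Chars.isIn_iff_infix, List.singleton_infix_iff,
                    h2, h3, h4, h5, h6, h7, h8, h9, replace_single, PySem.Chars.upper,
                    List.map_map, hfe]

-- ===== VERDICT (by name: the statement is the Claim_ definition above) =====
theorem IsHexspeak_spec : Claim_equal_IsHexspeak := by
  intro n _
  unfold Spec_IsHexspeak IsHexspeak IsHexspeak_alt
  exact main_eq _
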